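-- pv_equiv track=rewrite | github.com/ariffazil/wealth | server.py | weakest_epistemic
-- ===== SOURCE A (Python) =====
-- from typing import Any, Dict, List, Optional
--
-- EPISTEMIC_ORDER = ["UNKNOWN", "HYPOTHESIS", "ESTIMATE", "PLAUSIBLE", "CLAIM"]
--
-- RELIABILITY_TO_TAG = {
--     "guaranteed": "CLAIM",
--     "regular": "PLAUSIBLE",
--     "irregular": "ESTIMATE",
--     "speculative": "HYPOTHESIS",
-- }
--
-- def weakest_epistemic(items: List[dict], default_tag: str = "CLAIM") -> str:
--     if not items:
--         return default_tag
--     weakest_index = len(EPISTEMIC_ORDER) - 1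
--     for item in items:
--         reliability = str(item.get("reliability", "")).lower()
--         candidate = str(
--             item.get("tag")
--             or item.get("epistemic")
--             or RELIABILITY_TO_TAG.get(reliability, default_tag)
--         ).upper()
--         if candidate in EPISTEMIC_ORDER:
--             weakest_index = min(weakest_index, EPISTEMIC_ORDER.index(candidate))
--     return EPISTEMIC_ORDER[weakest_index]
-- ===== SOURCE B (Python) =====
-- EPISTEMIC_ORDER = ["UNKNOWN", "HYPOTHESIS", "ESTIMATE", "PLAUSIBLE", "CLAIM"]
--
-- RELIABILITY_TO_TAG = {
--     "guaranteed": "CLAIM",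
--     "regular": "PLAUSIBLE",
--     "irregular": "ESTIMATE",
--     "speculative": "HYPOTHESIS",
-- }
--
--
-- def _candidate(item, default_tag):
--     rel = str(item.get("reliability", "")).lower()
--     return str(
--         item.get("tag")
--         or item.get("epistemic")
--         or RELIABILITY_TO_TAG.get(rel, default_tag)
--     ).upper()
--
--
-- def weakest_epistemic(items, default_tag="CLAIM"):
--     if not items:
--         return default_tag
--     present = set()
--     for item in items:
--         c = _candidate(item, default_tag)
--         if c in EPISTEMIC_ORDER:
--             present.add(c)
--     for tag in EPISTEMIC_ORDER:
--         if tag in present: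
--             return tag
--     return EPISTEMIC_ORDER[-1]
-- ===== Notes on version B (the rewrite author's own statement) =====
-- stated objective: alternative
-- what changed: Replaces A's single pass that tracks a running minimum index into EPISTEMIC_ORDER with two passes: collect the valid candidate tags into a set, then scan EPISTEMIC_ORDER from the weakest end and return the first tag present (falling back to EPISTEMIC_ORDER[-1]).
import Mathlib
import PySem

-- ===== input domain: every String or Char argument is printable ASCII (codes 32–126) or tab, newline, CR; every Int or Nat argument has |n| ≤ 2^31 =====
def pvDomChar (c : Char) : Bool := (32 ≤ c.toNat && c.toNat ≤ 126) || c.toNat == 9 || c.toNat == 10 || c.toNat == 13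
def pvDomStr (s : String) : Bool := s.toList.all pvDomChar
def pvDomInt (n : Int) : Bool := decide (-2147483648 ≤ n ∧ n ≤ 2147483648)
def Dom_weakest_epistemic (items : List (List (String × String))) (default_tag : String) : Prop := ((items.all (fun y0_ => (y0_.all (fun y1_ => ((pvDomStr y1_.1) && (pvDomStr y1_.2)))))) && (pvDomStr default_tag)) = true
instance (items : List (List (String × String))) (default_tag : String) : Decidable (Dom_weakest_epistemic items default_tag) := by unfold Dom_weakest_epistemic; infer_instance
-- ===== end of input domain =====

-- B replaces A's running-min index tracking with two passes — collect the valid candidate tags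
-- into a set, then scan EPISTEMIC_ORDER from the weakest end for the first tag present (alternative decomposition).


def EPISTEMIC_ORDER : List String := ["UNKNOWN", "HYPOTHESIS", "ESTIMATE", "PLAUSIBLE", "CLAIM"]

def RELIABILITY_TO_TAG : List (String × String) :=
  [("guaranteed", "CLAIM"), ("regular", "PLAUSIBLE"), ("irregular", "ESTIMATE"), ("speculative", "HYPOTHESIS")]

-- dict lookup under the task's type convention: first matching key
def pvGet? (d : List (String × String)) (k : String) : Option String :=
  (d.find? (fun p => p.1 == k)).map (fun p => p.2)

def pvGetD (d : List (String × String)) (k dflt : String) : String :=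
  (pvGet? d k).getD dflt

-- ===== PORT A =====
-- literal port of A: one pass keeping the minimum valid index, then index into EPISTEMIC_ORDER
def weakest_epistemic (items : List (List (String × String))) (default_tag : String) : String :=
  if items = [] then default_tag
  else
    let weakest_index :=
      items.foldl (fun weakest_index item =>
        let reliability := PySem.Str.lower (pvGetD item "reliability" "")
        -- Python's `x or y or z`: first truthy operand; a missing key and "" are both falsy
        let v1 := (pvGet? item "tag").getD ""
        let v2 := (pvGet? item "epistemic").getD ""
        let candidate := PySem.Str.upper
          (if v1 ≠ "" then v1 else if v2 ≠ "" then v2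
           else pvGetD RELIABILITY_TO_TAG reliability default_tag)
        if EPISTEMIC_ORDER.contains candidate then
          min weakest_index ((PySem.List.index? EPISTEMIC_ORDER candidate).getD 0)
        else weakest_index) (EPISTEMIC_ORDER.length - 1)
    EPISTEMIC_ORDER.getD weakest_index ""   -- weakest_index is always < 5, so plain getD is exact

-- ===== PORT B =====
def pvCandidate (item : List (String × String)) (default_tag : String) : String :=
  let rel := PySem.Str.lower (pvGetD item "reliability" "")
  let t1 := (pvGet? item "tag").getD ""
  let t2 := (pvGet? item "epistemic").getD ""
  PySem.Str.upper
    (if t1 ≠ "" then t1 else if t2 ≠ "" then t2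
     else pvGetD RELIABILITY_TO_TAG rel default_tag)

def weakest_epistemic_alt (items : List (List (String × String))) (default_tag : String) : String :=
  if items = [] then default_tag
  else
    let present : PySem.Set String :=
      items.foldl (fun present item =>
        let c := pvCandidate item default_tag
        if EPISTEMIC_ORDER.contains c then PySem.Set.add present c else present) PySem.Set.empty
    match EPISTEMIC_ORDER.find? (fun tag => PySem.Set.contains present tag) with
    | some tag => tag
    | none => (PySem.List.pyGet? EPISTEMIC_ORDER (-1)).getD ""   -- EPISTEMIC_ORDER[-1]

-- ===== PRECONDITION & SPEC =====
def Spec_weakest_epistemic (items : List (List (String × String))) (default_tag : String) (out : String) : Prop := out = weakest_epistemic_alt items default_tag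
instance (items : List (List (String × String))) (default_tag : String) (out : String) : Decidable (Spec_weakest_epistemic items default_tag out) := by unfold Spec_weakest_epistemic; infer_instance

-- ===== CLAIM (what is proved, stated in full; the proofs are below) =====
def Claim_equal_weakest_epistemic : Prop := ∀ (items : List (List (String × String))) (default_tag : String), Dom_weakest_epistemic items default_tag → Spec_weakest_epistemic items default_tag (weakest_epistemic items default_tag)

-- ===== LEMMAS AND PROOFS =====

-- the joint loop invariant
-- pvSelect is B's second pass: the first tag of EPISTEMIC_ORDER present in the set
def pvSelect (acc : PySem.Set String) : String :=
  match EPISTEMIC_ORDER.find? (fun tag => PySem.Set.contains acc tag) with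
  | some tag => tag
  | none => (PySem.List.pyGet? EPISTEMIC_ORDER (-1)).getD ""

-- the joint loop invariant: order.getD w matches B's scan over the accumulated set
set_option maxRecDepth 8192 in
set_option maxHeartbeats 2000000 in
theorem loop_invariant (default_tag : String) (items : List (List (String × String))) :
    ∀ (w : Nat) (acc : PySem.Set String), w ≤ 4 →
    EPISTEMIC_ORDER.getD w "" = pvSelect acc →
    EPISTEMIC_ORDER.getD
      (items.foldl (fun weakest_index item =>
        if EPISTEMIC_ORDER.contains (pvCandidate item default_tag) then
          min weakest_index ((PySem.List.index? EPISTEMIC_ORDER (pvCandidate item default_tag)).getD 0)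
        else weakest_index) w) "" =
      pvSelect (items.foldl (fun present item =>
        if EPISTEMIC_ORDER.contains (pvCandidate item default_tag) then
          PySem.Set.add present (pvCandidate item default_tag)
        else present) acc) := by
  induction items with
  | nil => intro w acc hw h; simpa using h
  | cons item rest ih =>
    intro w acc hw h
    simp only [List.foldl_cons]
    refine ih _ _ ?_ ?_
    · split
      · have := Nat.min_le_left w ((PySem.List.index? EPISTEMIC_ORDER (pvCandidate item default_tag)).getD 0)
        omega
      · exact hw
    · clear ih
      by_cases hm : EPISTEMIC_ORDER.contains (pvCandidate item default_tag) = true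
      · simp only [hm, if_pos]
        have hcs : pvCandidate item default_tag = "UNKNOWN" ∨ pvCandidate item default_tag = "HYPOTHESIS" ∨
            pvCandidate item default_tag = "ESTIMATE" ∨ pvCandidate item default_tag = "PLAUSIBLE" ∨
            pvCandidate item default_tag = "CLAIM" := by
          simpa [EPISTEMIC_ORDER] using hm
        have hw' : w = 0 ∨ w = 1 ∨ w = 2 ∨ w = 3 ∨ w = 4 := by omega
        replace h := h.symm
        rcases hcs with hc|hc|hc|hc|hc <;> rw [hc] <;>
          rcases hw' with rfl|rfl|rfl|rfl|rfl <;> clear hm hw hc item rest <;>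
          cases h0 : PySem.Set.contains acc "UNKNOWN" <;>
          cases h1 : PySem.Set.contains acc "HYPOTHESIS" <;>
          cases h2 : PySem.Set.contains acc "ESTIMATE" <;>
          cases h3 : PySem.Set.contains acc "PLAUSIBLE" <;>
          cases h4 : PySem.Set.contains acc "CLAIM" <;>
          simp_all [pvSelect, EPISTEMIC_ORDER, List.find?, List.idxOf?, List.findIdx?, List.findIdx?.go, PySem.List.pyGet?, PySem.List.pyIdx?]
      · rw [if_neg hm, if_neg hm]; exact h

-- ===== VERDICT (by name: the statement is the Claim_ definition above) =====
theorem weakest_epistemic_spec : Claim_equal_weakest_epistemic := by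
  intro items default_tag _
  unfold Spec_weakest_epistemic weakest_epistemic weakest_epistemic_alt
  by_cases hnil : items = []
  · simp [hnil]
  · simp only [hnil, if_false]
    exact loop_invariant default_tag items 4 PySem.Set.empty (by omega) (by decide)
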